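-- pv_equiv track=rewrite | github.com/yoshivda/aoc2020 | days/day20.py | rotate_flip_tile
-- ===== SOURCE A (Python) =====
-- def rotate_flip_tile(tile, target_tile, dir):
--     def matches(tile, target_tile, dir):
--         if dir == 1:
--             return target_tile[-1] == tile[0]
--         else:
--             return [line[0] for line in tile] == [line[-1] for line in target_tile]
--
--     res = tile
--     for _ in range(4):
--         # Rotate
--         res = [''.join(res[i][j] for i in range(len(res) - 1, -1, -1)) for j in range(len(res))]
--         if matches(res, target_tile, dir):
--             return res
--         else:
--             # Horizontal flip
--             new_res = [line[::-1] for line in res]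
--             if matches(new_res, target_tile, dir):
--                 return new_res
-- ===== SOURCE B (Python) =====
-- def rotate_flip_tile(tile, target_tile, dir):
--     # Dihedral-group reimplementation: each of the 8 orientations is a coordinate
--     # map (r, c) -> source cell of the n x n top-left block of `tile`; compare
--     # only the relevant edge of each orientation (in A's rotate/flip order) and
--     # materialize the full matrix once, for the first orientation that matches.
--     n = len(tile)
--     maps = [
--         lambda r, c: (n - 1 - c, r),          # rot90
--         lambda r, c: (c, r),                  # rot90 + hflip (transpose)
--         lambda r, c: (n - 1 - r, n - 1 - c),  # rot180
--         lambda r, c: (n - 1 - r, c),          # rot180 + hflip (vertical flip)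
--         lambda r, c: (c, n - 1 - r),          # rot270
--         lambda r, c: (n - 1 - c, n - 1 - r),  # rot270 + hflip (anti-transpose)
--         lambda r, c: (r, c),                  # rot360 (identity on the block)
--         lambda r, c: (r, n - 1 - c),          # horizontal flip
--     ]
--
--     def cell(f, r, c):
--         i, j = f(r, c)
--         return tile[i][j]
--
--     if dir == 1:
--         want = target_tile[-1]
--         edge = lambda f: ''.join(cell(f, 0, c) for c in range(n))
--     else:
--         want = [line[-1] for line in target_tile]
--         edge = lambda f: [cell(f, r, 0) for r in range(n)]
--
--     for f in maps:
--         if edge(f) == want: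
--             return [''.join(cell(f, r, c) for c in range(n)) for r in range(n)]
--     return None
-- ===== Notes on version B (the rewrite author's own statement) =====
-- stated objective: alternative
-- what changed: A repeatedly materializes rotated/flipped matrices and tests each; B never rotates matrices at all: it represents the 8 orientations as dihedral-group coordinate maps (r,c)->(i,j) on the original tile, compares only the single relevant edge of each orientation, and materializes one matrix only for the winning map.
import Mathlib
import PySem

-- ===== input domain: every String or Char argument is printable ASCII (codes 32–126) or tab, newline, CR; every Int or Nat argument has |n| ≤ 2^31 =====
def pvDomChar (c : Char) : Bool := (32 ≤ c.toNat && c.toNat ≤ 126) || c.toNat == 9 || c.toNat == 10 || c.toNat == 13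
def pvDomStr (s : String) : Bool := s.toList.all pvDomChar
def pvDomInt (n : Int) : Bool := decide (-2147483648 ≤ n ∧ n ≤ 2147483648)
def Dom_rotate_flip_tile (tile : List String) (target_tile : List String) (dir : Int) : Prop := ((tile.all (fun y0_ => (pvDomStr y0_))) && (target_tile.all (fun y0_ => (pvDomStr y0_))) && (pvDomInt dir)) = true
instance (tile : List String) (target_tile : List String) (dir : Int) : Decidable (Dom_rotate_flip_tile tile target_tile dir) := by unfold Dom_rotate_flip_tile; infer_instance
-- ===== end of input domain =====

-- B replaces A's repeated matrix rotation/flipping by dihedral-group coordinate maps on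
-- the original tile: it compares only the relevant edge of each of the 8 orientations and
-- materializes one matrix for the first matching map (objective: alternative algorithm).

-- ===== PORT A =====
-- A's inner helper `matches`: option-level comparison is exact wherever the Python
-- indexing does not raise (guaranteed by Pre_).
def matchesA (tile : List String) (target_tile : List String) (dir : Int) : Bool :=
  if dir == 1 then
    PySem.List.pyGet? target_tile (-1) == PySem.List.pyGet? tile 0
  else
    tile.map (fun line => PySem.Str.pyGet? line 0)
      == target_tile.map (fun line => PySem.Str.pyGet? line (-1))

-- A's rotation: row j = column j read bottom-to-top (index loop, as in A).
def rotateA (res : List String) : List String :=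
  (PySem.List.pyRange 0 (res.length : Int) 1).map (fun j =>
    String.ofList ((PySem.List.pyRange ((res.length : Int) - 1) (-1) (-1)).map
      (fun i => (PySem.Str.pyGet? (PySem.List.pyGetD res i "") j).getD ' ')))

-- A's horizontal flip: line[::-1]
def flipA (res : List String) : List String :=
  res.map (fun line => String.ofList line.toList.reverse)

-- the `for _ in range(4)` loop with its two early returns
def loopA (target_tile : List String) (dir : Int) : Nat → List String → Option (List String)
  | 0, _ => none
  | k + 1, res =>
    let r := rotateA res
    if matchesA r target_tile dir then some r
    else
      let f := flipA r
      if matchesA f target_tile dir then some f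
      else loopA target_tile dir k r

def rotate_flip_tile (tile : List String) (target_tile : List String) (dir : Int) : Option (List String) :=
  loopA target_tile dir 4 tile

-- ===== PORT B =====
-- B's 8 orientation maps, in A's rotate/flip order (cumulative rotations interleaved with flips)
def mapsB (n : Int) : List (Int → Int → Int × Int) :=
  [fun r c => (n - 1 - c, r),
   fun r c => (c, r),
   fun r c => (n - 1 - r, n - 1 - c),
   fun r c => (n - 1 - r, c),
   fun r c => (c, n - 1 - r),
   fun r c => (n - 1 - c, n - 1 - r),
   fun r c => (r, c),
   fun r c => (r, n - 1 - c)]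

-- tile[i][j] through a coordinate map; the getD defaults are never read under Pre_
def cellB (tile : List String) (f : Int → Int → Int × Int) (r c : Int) : Char :=
  let ij := f r c
  (PySem.Str.pyGet? (PySem.List.pyGetD tile ij.1 "") ij.2).getD ' '

-- ''.join(cell(f, r, c) for c in range(n))
def rowB (tile : List String) (f : Int → Int → Int × Int) (n r : Int) : String :=
  String.ofList ((PySem.List.pyRange 0 n 1).map (fun c => cellB tile f r c))

-- B's search: compare the relevant edge of each orientation (option-level comparison is
-- exact wherever B's Python indexing does not raise, guaranteed by Pre_), then build the
-- full matrix once for the first matching map.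
def rotate_flip_tile_alt (tile : List String) (target_tile : List String) (dir : Int) : Option (List String) :=
  let n : Int := (tile.length : Int)
  let found :=
    if dir == 1 then
      (mapsB n).find? (fun f => some (rowB tile f n 0) == PySem.List.pyGet? target_tile (-1))
    else
      (mapsB n).find? (fun f =>
        (PySem.List.pyRange 0 n 1).map (fun r => some (cellB tile f r 0))
          == target_tile.map (fun line => PySem.Str.pyGet? line (-1)))
  found.map (fun f => (PySem.List.pyRange 0 n 1).map (fun r => rowB tile f n r))

-- ===== PRECONDITION & SPEC =====
-- Pre_ is exactly the set of inputs on which the Python A returns normally: the first rotation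
-- raises IndexError if some row is shorter than the number of rows; with dir == 1, matches
-- raises on an empty tile or empty target; otherwise it raises if some target line is empty.
def Pre_rotate_flip_tile (tile : List String) (target_tile : List String) (dir : Int) : Prop :=
  (∀ s ∈ tile, tile.length ≤ s.toList.length) ∧
  (if dir = 1 then tile ≠ [] ∧ target_tile ≠ []
   else ∀ s ∈ target_tile, s.toList ≠ [])
instance (tile : List String) (target_tile : List String) (dir : Int) : Decidable (Pre_rotate_flip_tile tile target_tile dir) := by unfold Pre_rotate_flip_tile; infer_instance

def pvWitness_rotate_flip_tile : List String × List String × Int := (["ab", "cd"], ["xy", "ca"], 1)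

def Spec_rotate_flip_tile (tile : List String) (target_tile : List String) (dir : Int) (out : Option (List String)) : Prop := out = rotate_flip_tile_alt tile target_tile dir
instance (tile : List String) (target_tile : List String) (dir : Int) (out : Option (List String)) : Decidable (Spec_rotate_flip_tile tile target_tile dir out) := by unfold Spec_rotate_flip_tile; infer_instance

-- ===== CLAIM (what is proved, stated in full; the proofs are below) =====
def Claim_equal_rotate_flip_tile : Prop := ∀ (tile : List String) (target_tile : List String) (dir : Int), Dom_rotate_flip_tile tile target_tile dir → Pre_rotate_flip_tile tile target_tile dir → Spec_rotate_flip_tile tile target_tile dir (rotate_flip_tile tile target_tile dir)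

-- ===== LEMMAS AND PROOFS =====

-- read a cell of a matrix, with the ports' default conventions
def getM (M : List String) (i j : Int) : Char :=
  (PySem.Str.pyGet? (PySem.List.pyGetD M i "") j).getD ' '

-- the n×n matrix whose cell (r, c) is g r c
def matGen (n : Int) (g : Int → Int → Char) : List String :=
  (PySem.List.pyRange 0 n 1).map (fun r => String.ofList ((PySem.List.pyRange 0 n 1).map (g r)))

-- A's candidates, in check order (proof-side restatement of loopA's traversal)
def candsA : Nat → List String → List (List String)
  | 0, _ => []
  | k + 1, m => [rotateA m, flipA (rotateA m)] ++ candsA k (rotateA m)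

theorem revmap_range (n : Int) (g : Int → Char) :
    ((PySem.List.pyRange 0 n 1).map g).reverse
      = (PySem.List.pyRange 0 n 1).map (fun c => g (n - 1 - c)) := by
  rcases le_or_gt n 0 with h | h
  · rw [PySem.List.pyRange_one_eq_nil h]; simp
  · apply List.ext_getElem
    · simp
    · intro i h1 h2
      simp only [List.getElem_reverse, List.getElem_map, PySem.List.getElem_pyRange_one,
        List.length_map, PySem.List.length_pyRange_one] at h1 h2 ⊢
      congr 1
      omega

theorem length_matGen (n : Int) (g : Int → Int → Char) : (matGen n g).length = n.toNat := by
  simp [matGen, PySem.List.length_pyRange_one]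

theorem evalMat (n : Int) (g : Int → Int → Char) (i j : Int)
    (hi0 : 0 ≤ i) (hin : i < n) (hj0 : 0 ≤ j) (hjn : j < n) :
    getM (matGen n g) i j = g i j := by
  unfold getM matGen
  rw [PySem.List.pyGetD_map_pyRange_of_nonneg _ _ _ _ hi0 hin]
  simp only [PySem.Str.pyGet?, String.toList_ofList]
  rw [show PySem.Chars.pyGet? = (PySem.List.pyGet? (α := Char)) from rfl]
  rw [PySem.List.pyGet?_of_nonneg _ hj0]
  rw [List.getElem?_eq_getElem (by simp [PySem.List.length_pyRange_one]; omega)]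
  simp only [Option.getD_some, List.getElem_map, PySem.List.getElem_pyRange_one]
  congr 1
  omega

theorem matGen_congr (n : Int) (g g' : Int → Int → Char) (h : ∀ r c, g r c = g' r c) :
    matGen n g = matGen n g' := by
  unfold matGen
  refine List.map_congr_left (fun r _ => ?_)
  congr 1
  exact List.map_congr_left (fun c _ => h r c)

theorem rotateA_eq_matGen (M : List String) :
    rotateA M = matGen (M.length : Int) (fun r c => getM M ((M.length : Int) - 1 - c) r) := by
  unfold rotateA matGen
  refine List.map_congr_left (fun j _ => ?_)
  congr 1
  rw [PySem.List.pyRange_neg_one_eq_reverse]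
  norm_num
  rw [revmap_range]
  rfl

theorem rotateA_matGen (n : Int) (hn : 0 ≤ n) (g : Int → Int → Char) :
    rotateA (matGen n g) = matGen n (fun r c => g (n - 1 - c) r) := by
  rw [rotateA_eq_matGen, length_matGen]
  rw [show ((n.toNat : Int)) = n by omega]
  unfold matGen
  refine List.map_congr_left (fun r hr => ?_)
  congr 1
  refine List.map_congr_left (fun c hc => ?_)
  rw [PySem.List.mem_pyRange_one] at hr hc
  exact evalMat n g _ _ (by omega) (by omega) (by omega) (by omega)

theorem flipA_matGen (n : Int) (g : Int → Int → Char) :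
    flipA (matGen n g) = matGen n (fun r c => g r (n - 1 - c)) := by
  unfold flipA matGen
  rw [List.map_map]
  refine List.map_congr_left (fun r _ => ?_)
  simp only [Function.comp, String.toList_ofList]
  rw [revmap_range]

theorem loopA_eq_find (target_tile : List String) (dir : Int) (k : Nat) (res : List String) :
    loopA target_tile dir k res
      = (candsA k res).find? (fun c => matchesA c target_tile dir) := by
  induction k generalizing res with
  | zero => rfl
  | succ k ih =>
    simp only [loopA, candsA, List.cons_append, List.nil_append, List.find?]
    by_cases h1 : matchesA (rotateA res) target_tile dir
    · simp [h1]
    · by_cases h2 : matchesA (flipA (rotateA res)) target_tile dir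
      · simp [h1, h2]
      · simp [h1, h2, ih]

theorem beqSymm {A : Type} [BEq A] [LawfulBEq A] (a b : A) : (a == b) = (b == a) := by
  by_cases h : a = b
  · subst h; rfl
  · rw [beq_eq_false_iff_ne.mpr h, beq_eq_false_iff_ne.mpr (Ne.symm h)]

theorem headMat (n : Int) (g : Int → Int → Char) (hn : 0 < n) :
    PySem.List.pyGet? (matGen n g) 0
      = some (String.ofList ((PySem.List.pyRange 0 n 1).map (g 0))) := by
  unfold matGen
  rw [PySem.List.pyRange_one_cons hn, List.map_cons, PySem.List.pyGet?_zero_cons]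

theorem colMat (n : Int) (g : Int → Int → Char) :
    (matGen n g).map (fun line => PySem.Str.pyGet? line 0)
      = (PySem.List.pyRange 0 n 1).map (fun r => some (g r 0)) := by
  unfold matGen
  rw [List.map_map]
  refine List.map_congr_left (fun r hr => ?_)
  rw [PySem.List.mem_pyRange_one] at hr
  simp only [Function.comp, PySem.Str.pyGet?, String.toList_ofList]
  rw [show PySem.Chars.pyGet? = (PySem.List.pyGet? (α := Char)) from rfl]
  rw [PySem.List.pyRange_one_cons (by omega : (0:Int) < n), List.map_cons,
    PySem.List.pyGet?_zero_cons]

-- the eight orientation matrices are the coordinate-map matrices, in order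
theorem getM_congr (M : List String) {i i' j j' : Int} (hi : i = i') (hj : j = j') :
    getM M i j = getM M i' j' := by rw [hi, hj]

set_option maxHeartbeats 1000000 in
theorem candsA_eq_mats (tile : List String) :
    candsA 4 tile
      = (mapsB (tile.length : Int)).map (fun f => matGen (tile.length : Int)
          (fun r c => cellB tile f r c)) := by
  have hN : (0:Int) ≤ (tile.length : Int) := by positivity
  set N : Int := (tile.length : Int) with hNdef
  have e1 : rotateA tile = matGen N (fun r c => cellB tile (fun r c => (N - 1 - c, r)) r c) :=
    rotateA_eq_matGen tile
  simp only [candsA, List.cons_append, List.nil_append, mapsB, List.map_cons, List.map_nil, e1]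
  rw [rotateA_matGen N hN, rotateA_matGen N hN, rotateA_matGen N hN,
    flipA_matGen, flipA_matGen, flipA_matGen, flipA_matGen]
  have hcell : ∀ f r c, cellB tile f r c = getM tile (f r c).1 (f r c).2 := fun _ _ _ => rfl
  simp only [List.cons.injEq]
  repeat' apply And.intro
  all_goals first
    | trivial
    | (apply matGen_congr; intro r c; simp only [hcell]; apply getM_congr tile <;> ring)
theorem final_case (tile target_tile : List String) (dir : Int)
    (hpre : Pre_rotate_flip_tile tile target_tile dir) :
    rotate_flip_tile tile target_tile dir = rotate_flip_tile_alt tile target_tile dir := by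
  unfold rotate_flip_tile rotate_flip_tile_alt
  rw [loopA_eq_find, candsA_eq_mats, List.find?_map]
  by_cases hd : dir == 1
  · have hd' : dir = 1 := by simpa using hd
    have htile : tile ≠ [] := by
      have h2 := hpre.2; rw [if_pos hd'] at h2; exact h2.1
    have hN1 : (0:Int) < (tile.length : Int) := by
      exact_mod_cast List.length_pos_iff.mpr htile
    simp only [hd, if_true]
    have hfun : ((fun c => matchesA c target_tile dir) ∘
          (fun f => matGen (tile.length : Int) (fun r c => cellB tile f r c)))
        = (fun f => some (rowB tile f (tile.length : Int) 0)
            == PySem.List.pyGet? target_tile (-1)) := by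
      funext f
      simp only [Function.comp, matchesA, hd, if_true]
      rw [headMat _ _ hN1, beqSymm]
      rfl
    rw [hfun]
    rfl
  · simp only [hd, if_false, Bool.false_eq_true]
    have hfun : ((fun c => matchesA c target_tile dir) ∘
          (fun f => matGen (tile.length : Int) (fun r c => cellB tile f r c)))
        = (fun f => (PySem.List.pyRange 0 (tile.length : Int) 1).map
              (fun r => some (cellB tile f r 0))
            == target_tile.map (fun line => PySem.Str.pyGet? line (-1))) := by
      funext f
      simp only [Function.comp, matchesA, hd, if_false, Bool.false_eq_true]
      rw [colMat]
    rw [hfun]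
    rfl

-- ===== VERDICT (by name: the statement is the Claim_ definition above) =====
theorem rotate_flip_tile_spec : Claim_equal_rotate_flip_tile := by
  intro tile target_tile dir _ hpre
  exact final_case tile target_tile dir hpre
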